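-- pv_equiv track=rewrite | github.com/yuvaltoledano/ESMA-Templates-Python | src/esma_milan/parity/diff.py | _build_group_relabel
-- ===== SOURCE A (Python) =====
-- from collections import defaultdict
-- from typing import Any
--
-- GROUP_ID_COLUMNS: frozenset[str] = frozenset({
--     "collateral_group_id",
--     "calc_collateral_group_id",
--     "Additional data 4 - calc_collateral_group_id",
-- })
--
-- NODE_ID_COLUMNS_BY_PRIORITY: tuple[str, ...] = (
--     # Loan-side row identifiers (Cleaned ESMA loans, Combined flattened
--     # pool, MILAN template pool).
--     "calc_loan_id",
--     "Loan Identifier",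
--     "Additional data 1 - calc_loan_id",
--     "loan_id",
--     "new_underlying_exposure_identifier",
--     # Property-side row identifiers (Cleaned ESMA properties). The
--     # property sheet has no calc_loan_id column, so we fall through to
--     # property-id columns. underlying_exposure_identifier is NOT
--     # row-unique on the property sheet (a single loan can back multiple
--     # properties), so calc_property_id is preferred.
--     "calc_property_id",
--     "Property Identifier",
--     "Additional data 3 - calc_main_property_id",
-- )
--
-- def _build_group_relabel(
--     header: tuple[str, ...],
--     rows: list[tuple[Any, ...]],
-- ) -> dict[Any, Any]:
--     """Build a {original_group_id -> canonical_group_id} relabel map.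
--
--     Canonical id = rank of the sorted-min loan id within the group. This
--     makes group ids comparable between R (igraph) and Python (networkx),
--     which produce different integer labels for the same partition.
--     """
--     group_col = next((c for c in header if c in GROUP_ID_COLUMNS), None)
--     if group_col is None:
--         return {}
--     group_idx = header.index(group_col)
--
--     loan_col = next((c for c in NODE_ID_COLUMNS_BY_PRIORITY if c in header), None)
--     if loan_col is None:
--         return {}
--     loan_idx = header.index(loan_col)
--
--     members: dict[Any, list[Any]] = defaultdict(list)
--     for row in rows:
--         if group_idx >= len(row) or loan_idx >= len(row):
--             continue
--         gid = row[group_idx]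
--         lid = row[loan_idx]
--         if gid is None or lid is None:
--             continue
--         members[gid].append(lid)
--
--     if not members:
--         return {}
--
--     # Canonicalise: sort each group's members, then sort groups by their
--     # min member, assign 1..N in that order.
--     sorted_groups = sorted(members.items(), key=lambda kv: min(str(x) for x in kv[1]))
--     return {gid: i + 1 for i, (gid, _) in enumerate(sorted_groups)}
-- ===== SOURCE B (Python) =====
-- from typing import Any
--
-- GROUP_ID_COLUMNS: frozenset[str] = frozenset({
--     "collateral_group_id",
--     "calc_collateral_group_id",
--     "Additional data 4 - calc_collateral_group_id",
-- })
--
-- NODE_ID_COLUMNS_BY_PRIORITY: tuple[str, ...] = (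
--     "calc_loan_id",
--     "Loan Identifier",
--     "Additional data 1 - calc_loan_id",
--     "loan_id",
--     "new_underlying_exposure_identifier",
--     "calc_property_id",
--     "Property Identifier",
--     "Additional data 3 - calc_main_property_id",
-- )
--
-- def _build_group_relabel(
--     header: tuple[str, ...],
--     rows: list[tuple[Any, ...]],
-- ) -> dict[Any, Any]:
--     """Build a {original_group_id -> canonical_group_id} relabel map.
--
--     Flat-pair variant: instead of accumulating a dict of member lists,
--     extract a flat (gid, str(lid)) pair list, take the group ids in
--     first-appearance order, and sort them by the minimum member string
--     recomputed from the pair list.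
--     """
--     gi = next((i for i, c in enumerate(header) if c in GROUP_ID_COLUMNS), None)
--     if gi is None:
--         return {}
--     li = next((header.index(c) for c in NODE_ID_COLUMNS_BY_PRIORITY if c in header), None)
--     if li is None:
--         return {}
--
--     pairs = [
--         (row[gi], str(row[li]))
--         for row in rows
--         if gi < len(row) and li < len(row)
--         and row[gi] is not None and row[li] is not None
--     ]
--     gids = list(dict.fromkeys(g for g, _ in pairs))
--     gids.sort(key=lambda g: min(s for g2, s in pairs if g2 == g))
--     return {g: i + 1 for i, g in enumerate(gids)}
-- ===== Notes on version B (the rewrite author's own statement) =====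
-- stated objective: alternative
-- what changed: B drops A's defaultdict-of-member-lists grouping entirely: it extracts a flat (gid, str(lid)) pair list in one comprehension, deduplicates the group ids in first-appearance order, and sorts them by a minimum recomputed from the pair list, instead of incrementally building per-group lists in a dict and reducing each with min() inside the sort key.
import Mathlib
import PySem

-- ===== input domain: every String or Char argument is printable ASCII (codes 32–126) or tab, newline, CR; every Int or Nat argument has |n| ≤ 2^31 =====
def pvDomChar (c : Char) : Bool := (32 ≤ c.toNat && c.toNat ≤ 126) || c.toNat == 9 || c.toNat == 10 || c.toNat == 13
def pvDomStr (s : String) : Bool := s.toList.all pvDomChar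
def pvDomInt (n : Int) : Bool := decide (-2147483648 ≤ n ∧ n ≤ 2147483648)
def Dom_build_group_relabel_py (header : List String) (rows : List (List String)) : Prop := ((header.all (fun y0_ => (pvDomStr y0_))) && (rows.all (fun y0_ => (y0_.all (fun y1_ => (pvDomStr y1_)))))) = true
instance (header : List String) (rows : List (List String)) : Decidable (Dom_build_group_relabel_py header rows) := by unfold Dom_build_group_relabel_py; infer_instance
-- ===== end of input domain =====

-- B replaces A's defaultdict-of-member-lists grouping by a flat (gid, lid) pair list:
-- group ids are deduplicated in first-appearance order and sorted by a minimum recomputed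
-- from the pair list (objective: alternative decomposition; not claimed faster).
-- Both programs return a fresh dict; neither mutates its arguments.
-- Under the type convention rows hold String values, so Python's `is None` guards and `str(x)`
-- conversions are identities and are not re-modelled in either port.

-- ===== PORT A =====
def pvGROUP_ID_COLUMNS : List String :=
  ["collateral_group_id", "calc_collateral_group_id",
   "Additional data 4 - calc_collateral_group_id"]

def pvNODE_ID_COLUMNS_BY_PRIORITY : List String :=
  ["calc_loan_id", "Loan Identifier", "Additional data 1 - calc_loan_id", "loan_id",
   "new_underlying_exposure_identifier", "calc_property_id", "Property Identifier",
   "Additional data 3 - calc_main_property_id"]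

-- min(str(x) for x in xs): values are strings, str is the identity; xs is nonempty wherever
-- A evaluates this (defaultdict lists get an element on creation), so the "" default is never used.
def pvMinStr (xs : List String) : String := (PySem.List.min? xs id).getD ""

-- loop body of A's `for row in rows:` (the `gid is None or lid is None` guard cannot fire on String)
def pvStepA (gidx lidx : Nat) (d : PySem.Dict String (List String)) (row : List String) :
    PySem.Dict String (List String) :=
  if row.length ≤ gidx ∨ row.length ≤ lidx then d
  else
    let gid := PySem.List.pyGetD row (gidx : Int) ""
    let lid := PySem.List.pyGetD row (lidx : Int) ""
    d.modify gid [] (· ++ [lid])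

def build_group_relabel_py (header : List String) (rows : List (List String)) : List (String × Int) :=
  match header.find? (fun c => pvGROUP_ID_COLUMNS.contains c) with
  | none => []
  | some gcol =>
    -- header.index(group_col): gcol was found in header, so index? is some; getD 0 is never the default
    let gidx := (PySem.List.index? header gcol).getD 0
    match pvNODE_ID_COLUMNS_BY_PRIORITY.find? (fun c => header.contains c) with
    | none => []
    | some lcol =>
      let lidx := (PySem.List.index? header lcol).getD 0
      let members := rows.foldl (pvStepA gidx lidx) PySem.Dict.empty
      if members.items = [] then []
      else
        let sortedGroups := PySem.List.sorted members.items (fun kv => pvMinStr kv.2)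
        -- {gid: i+1 …}: gids are dict keys, hence distinct; the dict is this association list
        (PySem.List.enumerate sortedGroups).map (fun p => (p.2.1, p.1 + 1))

-- ===== PORT B =====
-- the flat pair-list comprehension of B
def pvPairs (gi li : Nat) (rows : List (List String)) : List (String × String) :=
  rows.filterMap (fun row =>
    if gi < row.length ∧ li < row.length then
      some (PySem.List.pyGetD row (gi : Int) "", PySem.List.pyGetD row (li : Int) "")
    else none)

-- B's sort key: min(s for g2, s in pairs if g2 == g); nonempty for every g drawn from the pairs
def pvMinOf (pairs : List (String × String)) (g : String) : String :=
  (PySem.List.min? ((pairs.filter (fun p => p.1 == g)).map Prod.snd) id).getD ""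

def build_group_relabel_py_alt (header : List String) (rows : List (List String)) : List (String × Int) :=
  match header.findIdx? (fun c => pvGROUP_ID_COLUMNS.contains c) with
  | none => []
  | some gi =>
    -- next(header.index(c) for c in NODE_ID_COLUMNS_BY_PRIORITY if c in header): the index is
    -- taken of a column just checked to be in header, so index? getD 0 never uses the default
    match ((pvNODE_ID_COLUMNS_BY_PRIORITY.filter (fun c => header.contains c)).map
           (fun c => (PySem.List.index? header c).getD 0)).head? with
    | none => []
    | some li =>
      let pairs := pvPairs gi li rows
      let gids := PySem.List.dedup (pairs.map Prod.fst)
      let order := PySem.List.sorted gids (pvMinOf pairs)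
      (PySem.List.enumerate order).map (fun p => (p.2, p.1 + 1))

-- ===== PRECONDITION & SPEC =====
def Spec_build_group_relabel_py (header : List String) (rows : List (List String)) (out : List (String × Int)) : Prop := out = build_group_relabel_py_alt header rows
instance (header : List String) (rows : List (List String)) (out : List (String × Int)) : Decidable (Spec_build_group_relabel_py header rows out) := by unfold Spec_build_group_relabel_py; infer_instance

-- ===== CLAIM (what is proved, stated in full; the proofs are below) =====
def Claim_equal_build_group_relabel_py : Prop := ∀ (header : List String) (rows : List (List String)), Dom_build_group_relabel_py header rows → Spec_build_group_relabel_py header rows (build_group_relabel_py header rows)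

-- ===== LEMMAS AND PROOFS =====

-- `header.index(c)` after `find?` found c: the found element's first occurrence is where find? stopped
theorem pv_index_of_find? (l : List String) (p : String → Bool) (c : String)
    (h : l.find? p = some c) : PySem.List.index? l c = l.findIdx? p := by
  induction l with
  | nil => simp at h
  | cons a t ih =>
    by_cases hp : p a
    · simp [List.find?_cons_of_pos hp] at h
      subst h
      simp [PySem.List.index?, List.idxOf?_cons, List.findIdx?_cons, hp]
    · have hfa : p a = false := by simpa using hp
      rw [List.find?_cons_of_neg (by simp [hfa])] at h
      have hpc : p c = true := List.find?_some h
      have hac : (a == c) = false := by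
        simp only [beq_eq_false_iff_ne]; rintro rfl; simp [hpc] at hfa
      have := ih h
      simp only [PySem.List.index?] at this ⊢
      simp [List.idxOf?_cons, List.findIdx?_cons, hac, hfa, this]

-- find?/findIdx? correspondence for the group column
theorem pv_find?_of_findIdx? (l : List String) (p : String → Bool) (j : Nat)
    (h : l.findIdx? p = some j) :
    ∃ c, l.find? p = some c ∧ PySem.List.index? l c = some j := by
  cases hf : l.find? p with
  | none =>
    rw [List.find?_eq_none] at hf
    rw [List.findIdx?_eq_none_iff.mpr (fun x hx => by simpa using hf x hx)] at h
    exact absurd h (by simp)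
  | some c =>
    refine ⟨c, rfl, ?_⟩
    rw [pv_index_of_find? l p c hf, h]

theorem pv_head?_filter {α : Type} (p : α → Bool) (l : List α) :
    (l.filter p).head? = l.find? p := by
  induction l with
  | nil => rfl
  | cons a t ih =>
    by_cases hp : p a
    · simp [hp, List.find?_cons_of_pos hp]
    · have hfa : p a = false := by simpa using hp
      rw [List.filter_cons_of_neg (by simp [hfa]), List.find?_cons_of_neg (by simp [hfa])]
      exact ih

-- A's row loop is the pair-list fold: skip/modify per row = fold of the filterMap
theorem pv_foldA_eq_pairs_fold (gidx lidx : Nat) (rows : List (List String))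
    (d : PySem.Dict String (List String)) :
    rows.foldl (pvStepA gidx lidx) d =
      (pvPairs gidx lidx rows).foldl (fun d p => d.modify p.1 [] (· ++ [p.2])) d := by
  induction rows generalizing d with
  | nil => rfl
  | cons r rs ih =>
    simp only [List.foldl_cons, pvPairs, List.filterMap_cons]
    by_cases hg : gidx < r.length ∧ lidx < r.length
    · have hA : ¬ (r.length ≤ gidx ∨ r.length ≤ lidx) := by omega
      simp only [pvStepA, if_neg hA, if_pos hg, List.foldl_cons]
      exact ih _
    · have hA : r.length ≤ gidx ∨ r.length ≤ lidx := by omega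
      simp only [pvStepA, if_pos hA, if_neg hg]
      exact ih _

-- helper names for the grouped dict
theorem pv_dA_keys (gidx lidx : Nat) (rows : List (List String)) :
    (rows.foldl (pvStepA gidx lidx) PySem.Dict.empty).keys =
      PySem.List.dedup ((pvPairs gidx lidx rows).map Prod.fst) := by
  rw [pv_foldA_eq_pairs_fold, PySem.Dict.keys_foldl_modify_key (key := Prod.fst),
      PySem.Dict.keys_empty, PySem.Set.update_nil_left, PySem.List.dedup_eq_ofList]

theorem pv_dA_nodup (gidx lidx : Nat) (rows : List (List String)) :
    (rows.foldl (pvStepA gidx lidx) PySem.Dict.empty).keys.Nodup := by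
  rw [pv_dA_keys]; exact PySem.List.nodup_dedup _

theorem pv_dA_getD (gidx lidx : Nat) (rows : List (List String)) (g : String) :
    (rows.foldl (pvStepA gidx lidx) PySem.Dict.empty).getD g [] =
      ((pvPairs gidx lidx rows).filter (fun p => p.1 == g)).map (·.2) := by
  rw [pv_foldA_eq_pairs_fold, PySem.Dict.getD_foldl_modify_append, PySem.Dict.getD_empty]
  simp

-- a dict with Nodup keys is its key list paired with its lookups
theorem pv_items_eq_keys_map (d : PySem.Dict String (List String)) (hnd : d.keys.Nodup) :
    d.items = d.keys.map (fun g => (g, d.getD g [])) := by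
  have hk : d.keys = d.items.map Prod.fst := rfl
  rw [hk, List.map_map]
  apply List.ext_getElem (by simp)
  intro i h1 h2
  simp only [List.getElem_map, Function.comp_apply]
  have hm : d.items[i] ∈ d.items := List.getElem_mem _
  have := PySem.Dict.getD_of_mem_items (d := d) (d0 := [])
    (k := (d.items[i]).1) (v := (d.items[i]).2) (by simpa using hm) hnd
  rw [this]

-- insertion-sort transfer: sorting a mapped list with key k = mapping the sort by k ∘ g
theorem pv_insertBy_map {α β : Type} (g : α → β) (b : β → β → Bool) (x : α) (l : List α) :
    PySem.List.insertBy b (g x) (l.map g) =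
      (PySem.List.insertBy (fun a c => b (g a) (g c)) x l).map g := by
  induction l with
  | nil => rfl
  | cons a t ih =>
    simp only [List.map_cons, PySem.List.insertBy]
    split
    · simp
    · simp [ih]

theorem pv_sorted_map {α β : Type} (g : α → β) (k : β → String) (l : List α) :
    PySem.List.sorted (l.map g) k = (PySem.List.sorted l (fun x => k (g x))).map g := by
  simp only [PySem.List.sorted, if_neg (by simp : ¬ (false = true))]
  have : ∀ (l' : List α) (acc : List α),
      (l'.map g).foldl (fun acc x => PySem.List.insertBy (fun a c => decide (k a < k c)) x acc) (acc.map g) =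
      (l'.foldl (fun acc x => PySem.List.insertBy (fun a c => decide (k (g a) < k (g c))) x acc) acc).map g := by
    intro l'
    induction l' with
    | nil => intro acc; rfl
    | cons a t ih =>
      intro acc
      simp only [List.map_cons, List.foldl_cons]
      rw [pv_insertBy_map g _ a acc]
      exact ih _
  simpa using this l []

theorem pv_enumerate_map {α β : Type} (g : α → β) (l : List α) (n : Int) :
    PySem.List.enumerate (l.map g) n = (PySem.List.enumerate l n).map (fun p => (p.1, g p.2)) := by
  induction l generalizing n with
  | nil => rfl
  | cons a t ih => simp [PySem.List.enumerate, ih]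

-- ===== VERDICT (by name: the statement is the Claim_ definition above) =====
theorem build_group_relabel_py_spec : Claim_equal_build_group_relabel_py := by
  intro header rows _hdom
  unfold Spec_build_group_relabel_py build_group_relabel_py build_group_relabel_py_alt
  cases hidx : header.findIdx? (fun c => pvGROUP_ID_COLUMNS.contains c) with
  | none =>
    have hf : header.find? (fun c => pvGROUP_ID_COLUMNS.contains c) = none := by
      rw [List.find?_eq_none]
      intro x hx
      have := List.findIdx?_eq_none_iff.mp hidx x hx
      simpa using this
    rw [hf]
  | some gidx =>
    obtain ⟨gcol, hf, hidxc⟩ := pv_find?_of_findIdx? header _ gidx hidx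
    rw [hf]
    dsimp only
    rw [hidxc]
    simp only [Option.getD_some]
    rw [List.head?_map, pv_head?_filter]
    cases hl : pvNODE_ID_COLUMNS_BY_PRIORITY.find? (fun c => header.contains c) with
    | none => simp
    | some lcol =>
      simp only [Option.map_some]
      set lidx := (PySem.List.index? header lcol).getD 0 with hlidx
      set dA := rows.foldl (pvStepA gidx lidx) PySem.Dict.empty with hdA
      set pairs := pvPairs gidx lidx rows with hpairs
      have hnd : dA.keys.Nodup := pv_dA_nodup gidx lidx rows
      have hkeys : dA.keys = PySem.List.dedup (pairs.map Prod.fst) := pv_dA_keys gidx lidx rows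
      have hitems : dA.items = dA.keys.map (fun g => (g, dA.getD g [])) :=
        pv_items_eq_keys_map dA hnd
      by_cases hemp : dA.items = []
      · rw [if_pos hemp]
        have hkeysnil : dA.keys = [] := by
          have : dA.keys = dA.items.map Prod.fst := rfl
          rw [this, hemp]; rfl
        rw [← hkeys, hkeysnil]
        rfl
      · rw [if_neg hemp, hitems, ← hkeys,
            pv_sorted_map (fun g => (g, dA.getD g [])) (fun kv => pvMinStr kv.2) dA.keys]
        have hkeycong : (fun g => pvMinStr (dA.getD g [])) = pvMinOf pairs := by
          funext g
          rw [pvMinStr, pv_dA_getD, pvMinOf]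
        rw [hkeycong, pv_enumerate_map, List.map_map]
        rfl
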